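-- pv_equiv track=rewrite | github.com/LubabaKhalid/codeforces | Round1020/Flower Boy.py | can_collect
-- ===== SOURCE A (Python) =====
-- def can_collect(a, b, k=None):
--     flowers = a[:]
--     if k is not None:
--         flowers.append(k)
--     flowers.sort()
--     b.sort()
--     i=0
--     j=0
--     while i<len(flowers) and j<len(b):
--         if flowers[i]>=b[j]:
--             j+=1
--         i+=1
--     return j==len(b)
-- ===== SOURCE B (Python) =====
-- def can_collect(a, b, k=None):
--     flowers = a[:]
--     if k is not None:
--         flowers.append(k)
--     flowers.sort()
--     b.sort()
--     if len(b) > len(flowers):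
--         return False
--     tail = flowers[len(flowers) - len(b):]
--     return all(f >= r for f, r in zip(tail, b))
-- ===== Notes on version B (the rewrite author's own statement) =====
-- stated objective: alternative
-- what changed: Replaces A's two-pointer forward greedy scan by a direct alignment check: after sorting, the largest len(b) flowers are zipped pointwise against sorted b and compared, with an early length test.
import Mathlib
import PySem

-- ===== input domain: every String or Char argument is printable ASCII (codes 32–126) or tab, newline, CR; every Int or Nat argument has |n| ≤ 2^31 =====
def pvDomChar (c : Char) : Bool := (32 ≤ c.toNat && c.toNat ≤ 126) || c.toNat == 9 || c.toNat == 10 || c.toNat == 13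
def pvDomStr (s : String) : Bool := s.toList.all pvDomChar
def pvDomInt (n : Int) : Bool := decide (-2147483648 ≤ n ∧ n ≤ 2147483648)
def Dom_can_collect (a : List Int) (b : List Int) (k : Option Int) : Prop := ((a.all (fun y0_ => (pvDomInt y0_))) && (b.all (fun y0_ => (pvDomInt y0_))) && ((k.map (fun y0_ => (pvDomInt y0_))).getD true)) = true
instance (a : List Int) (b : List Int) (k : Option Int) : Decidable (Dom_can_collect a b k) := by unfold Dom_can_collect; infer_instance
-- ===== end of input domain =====

-- B replaces A's forward two-pointer greedy scan by a tail-alignment check (compare the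
-- largest len(b) sorted flowers pointwise with sorted b); alternative algorithm, same cost.
-- Like A, the Python B sorts b in place; the equivalence proved here is about the return value.


-- ===== PORT A =====
-- A's while loop: i walks flowers, j walks b; each iteration consumes the head flower and,
-- if it covers the head requirement, also that requirement; returns j == len(b).
def canCollectLoopA : List Int → List Int → Bool
  | _, [] => true
  | [], _ :: _ => false
  | f :: fs, r :: rs => if r ≤ f then canCollectLoopA fs rs else canCollectLoopA fs (r :: rs)

def can_collect (a : List Int) (b : List Int) (k : Option Int) : Bool :=
  let flowers := match k with | none => a | some v => a ++ [v]
  let flowers := PySem.List.sorted flowers (fun x => x) false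
  let bs := PySem.List.sorted b (fun x => x) false
  canCollectLoopA flowers bs

-- ===== PORT B =====
def can_collect_alt (a : List Int) (b : List Int) (k : Option Int) : Bool :=
  let flowers := match k with | none => a | some v => a ++ [v]
  let flowers := PySem.List.sorted flowers (fun x => x) false
  let bs := PySem.List.sorted b (fun x => x) false
  if bs.length > flowers.length then false
  else
    let tail := flowers.drop (flowers.length - bs.length)
    (tail.zip bs).all (fun p => p.2 ≤ p.1)

-- ===== PRECONDITION & SPEC =====
def Spec_can_collect (a : List Int) (b : List Int) (k : Option Int) (out : Bool) : Prop := out = can_collect_alt a b k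
instance (a : List Int) (b : List Int) (k : Option Int) (out : Bool) : Decidable (Spec_can_collect a b k out) := by unfold Spec_can_collect; infer_instance

-- ===== CLAIM (what is proved, stated in full; the proofs are below) =====
def Claim_equal_can_collect : Prop := ∀ (a : List Int) (b : List Int) (k : Option Int), Dom_can_collect a b k → Spec_can_collect a b k (can_collect a b k)

-- ===== LEMMAS AND PROOFS =====

-- "the largest |B| flowers of F cover B pointwise"
def CanCollectGood (F B : List Int) : Prop :=
  B.length ≤ F.length ∧ List.Forall₂ (fun x y => y ≤ x) (F.drop (F.length - B.length)) B

theorem canCollectGood_of_loopA (F : List Int) : ∀ B : List Int,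
    F.Pairwise (· ≤ ·) → canCollectLoopA F B = true → CanCollectGood F B := by
  induction F with
  | nil =>
    intro B _ h
    cases B with
    | nil => exact ⟨by simp, by simp⟩
    | cons r rs => simp [canCollectLoopA] at h
  | cons f fs ih =>
    intro B hs h
    cases B with
    | nil =>
      refine ⟨by simp, ?_⟩
      simp
    | cons r rs =>
      have hs' : fs.Pairwise (· ≤ ·) := hs.tail
      by_cases hrf : r ≤ f
      · have h' : canCollectLoopA fs rs = true := by
          simpa [canCollectLoopA, hrf] using h
        obtain ⟨hlen, hfa⟩ := ih rs hs' h'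
        refine ⟨by simpa using Nat.succ_le_succ hlen, ?_⟩
        have hd : (f :: fs).length - (r :: rs).length = fs.length - rs.length := by
          simp
        rw [hd]
        rcases Nat.eq_zero_or_pos (fs.length - rs.length) with he | he
        · have hEq : fs.length = rs.length := by omega
          rw [he] at hfa ⊢
          simp only [List.drop_zero] at hfa ⊢
          exact List.Forall₂.cons hrf hfa
        · obtain ⟨e, hE⟩ : ∃ e, fs.length - rs.length = e + 1 := ⟨_, (Nat.succ_pred_eq_of_pos he).symm⟩
          rw [hE] at hfa ⊢
          have helt : e < fs.length := by omega
          have hdropcons : fs.drop e = fs[e] :: fs.drop (e + 1) :=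
            List.drop_eq_getElem_cons helt
          have hhead : r ≤ fs[e] := by
            have hf_le : f ≤ fs[e] :=
              (List.pairwise_cons.mp hs).1 _ (List.getElem_mem helt)
            exact le_trans hrf hf_le
          have : (f :: fs).drop (e + 1) = fs.drop e := by simp
          rw [this, hdropcons]
          exact List.Forall₂.cons hhead hfa
      · have h' : canCollectLoopA fs (r :: rs) = true := by
          simpa [canCollectLoopA, hrf] using h
        obtain ⟨hlen, hfa⟩ := ih (r :: rs) hs' h'
        have hd : (f :: fs).length - (r :: rs).length = fs.length - (rs.length + 1) + 1 := by
          simp at hlen ⊢; omega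
        refine ⟨by simp at hlen ⊢; omega, ?_⟩
        rw [hd]
        have : (f :: fs).drop (fs.length - (rs.length + 1) + 1) = fs.drop (fs.length - (rs.length + 1)) := by
          simp
        rw [this]
        simpa using hfa

theorem loopA_of_canCollectGood (F : List Int) : ∀ B : List Int,
    CanCollectGood F B → canCollectLoopA F B = true := by
  induction F with
  | nil =>
    intro B h
    obtain ⟨hlen, _⟩ := h
    have : B = [] := List.eq_nil_of_length_eq_zero (by simpa using hlen)
    subst this; rfl
  | cons f fs ih =>
    intro B h
    cases B with
    | nil => rfl
    | cons r rs =>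
      obtain ⟨hlen, hfa⟩ := h
      have hlen' : rs.length ≤ fs.length := by simpa using hlen
      by_cases hrf : r ≤ f
      · -- consume both heads
        simp only [canCollectLoopA, if_pos hrf]
        apply ih
        refine ⟨hlen', ?_⟩
        have hd : (f :: fs).length - (r :: rs).length = fs.length - rs.length := by simp
        rw [hd] at hfa
        rcases Nat.eq_zero_or_pos (fs.length - rs.length) with he | he
        · rw [he] at hfa ⊢
          simp only [List.drop_zero] at hfa ⊢
          rcases hfa with _ | ⟨_, ht⟩
          exact ht
        · obtain ⟨e, hE⟩ : ∃ e, fs.length - rs.length = e + 1 := ⟨_, (Nat.succ_pred_eq_of_pos he).symm⟩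
          rw [hE] at hfa ⊢
          have hstep : (f :: fs).drop (e + 1) = fs.drop e := by simp
          rw [hstep] at hfa
          have helt : e < fs.length := by omega
          rw [List.drop_eq_getElem_cons helt] at hfa
          rcases hfa with _ | ⟨_, ht⟩
          exact ht
      · -- head flower too small: drop it
        simp only [canCollectLoopA, if_neg hrf]
        apply ih
        have hd0 : (f :: fs).length - (r :: rs).length = fs.length - rs.length := by simp
        rw [hd0] at hfa
        rcases Nat.eq_zero_or_pos (fs.length - rs.length) with he | he
        · exfalso
          rw [he] at hfa
          simp only [List.drop_zero] at hfa
          rcases hfa with _ | ⟨hle, _⟩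
          exact hrf hle
        · obtain ⟨e, hE⟩ : ∃ e, fs.length - rs.length = e + 1 := ⟨_, (Nat.succ_pred_eq_of_pos he).symm⟩
          refine ⟨by simp only [List.length_cons]; omega, ?_⟩
          have hd : fs.length - (r :: rs).length = e := by simp only [List.length_cons]; omega
          rw [hd]
          rw [hE] at hfa
          have hstep : (f :: fs).drop (e + 1) = fs.drop e := by simp
          rw [hstep] at hfa
          exact hfa

theorem canCollect_loop_eq_align (F B : List Int) (hs : F.Pairwise (· ≤ ·)) :
    canCollectLoopA F B =
      (if B.length > F.length then false
       else ((F.drop (F.length - B.length)).zip B).all (fun p => p.2 ≤ p.1)) := by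
  by_cases hlen : B.length ≤ F.length
  · rw [if_neg (by omega)]
    have hlendrop : (F.drop (F.length - B.length)).length = B.length := by
      simp; omega
    by_cases hg : CanCollectGood F B
    · rw [loopA_of_canCollectGood F B hg]
      obtain ⟨_, hfa⟩ := hg
      symm
      rw [List.all_eq_true]
      intro p hp
      obtain ⟨x, y⟩ := p
      have := (List.forall₂_iff_zip.mp hfa).2 hp
      simpa using this
    · have hA : canCollectLoopA F B ≠ true := fun h => hg (canCollectGood_of_loopA F B hs h)
      rw [Bool.eq_false_iff.mpr hA]
      symm
      rw [Bool.eq_false_iff]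
      intro hall
      apply hg
      refine ⟨hlen, ?_⟩
      rw [List.forall₂_iff_zip]
      refine ⟨hlendrop, ?_⟩
      intro x y hxy
      have := List.all_eq_true.mp hall (x, y) (by simpa using hxy)
      simpa using this
  · rw [if_pos (by omega)]
    -- B longer than F: the loop runs out of flowers with requirements left
    clear hs
    induction F generalizing B with
    | nil =>
      cases B with
      | nil => simp at hlen
      | cons r rs => rfl
    | cons f fs ihf =>
      cases B with
      | nil => simp at hlen
      | cons r rs =>
        by_cases hrf : r ≤ f
        · simp only [canCollectLoopA, if_pos hrf]
          apply ihf
          simp at hlen ⊢; omega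
        · simp only [canCollectLoopA, if_neg hrf]
          apply ihf
          simp at hlen ⊢; omega

-- ===== VERDICT (by name: the statement is the Claim_ definition above) =====
theorem can_collect_spec : Claim_equal_can_collect := by
  intro a b k _
  unfold Spec_can_collect can_collect can_collect_alt
  have hs : (PySem.List.sorted (match k with | none => a | some v => a ++ [v]) (fun x => x) false).Pairwise (· ≤ ·) := by
    simpa using PySem.List.sorted_pairwise (xs := (match k with | none => a | some v => a ++ [v])) (key := fun x => x)
  exact canCollect_loop_eq_align _ _ hs
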